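-- pv_equiv track=rewrite | github.com/vinchinzu/euler | python/310.py | _count_ordered_triples_for_values
-- ===== SOURCE A (Python) =====
-- from bisect import bisect_left
-- from typing import Dict, Iterable, List, Sequence, Tuple
--
-- def _count_ordered_triples_for_values(
--     pos_a: Sequence[int], pos_b: Sequence[int], pos_c: Sequence[int]
-- ) -> int:
--     """Count triples (a, b, c) with a <= b <= c.
--
--     - a ranges over pos_a
--     - b ranges over pos_b
--     - c ranges over pos_c
--
--     All sequences must be sorted. This function is performance-critical and
--     intentionally compact.
--     """
--
--     if not pos_a or not pos_b or not pos_c: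
--         return 0
--
--     count = 0
--
--     for b in pos_b:
--         # a choices: indices where a <= b
--         # bisect_left returns first index with value > b, so that index
--         # equals the count of entries <= b.
--         num_a = bisect_left(pos_a, b + 1)
--
--         # c choices: indices where c >= b
--         idx_c = bisect_left(pos_c, b)
--         num_c = len(pos_c) - idx_c
--
--         if num_a and num_c:
--             count += num_a * num_c
--
--     return count
-- ===== SOURCE B (Python) =====
-- def _count_ordered_triples_for_values(pos_a, pos_b, pos_c):
--     """Offline batched binary search: instead of bisecting twice per middle value,
--     walk each array's implicit search tree once, partitioning the whole query
--     list at every node; the pos_a walk directly accumulates the weighted sum."""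
--
--     def resolve_c(lo, hi, qs):
--         # returns [(b, insertion point of b in pos_c within [lo, hi))]
--         if not qs:
--             return []
--         if lo < hi:
--             mid = (lo + hi) // 2
--             ge = [b for b in qs if not pos_c[mid] < b]
--             lt = [b for b in qs if pos_c[mid] < b]
--             return resolve_c(lo, mid, ge) + resolve_c(mid + 1, hi, lt)
--         return [(b, lo) for b in qs]
--
--     def resolve_a(lo, hi, qs):
--         # qs: [(key, weight)]; returns sum of (insertion point of key) * weight
--         if not qs:
--             return 0
--         if lo < hi:
--             mid = (lo + hi) // 2
--             ge = [q for q in qs if not pos_a[mid] < q[0]]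
--             lt = [q for q in qs if pos_a[mid] < q[0]]
--             return resolve_a(lo, mid, ge) + resolve_a(mid + 1, hi, lt)
--         return sum(lo * w for _, w in qs)
--
--     n_c = len(pos_c)
--     pairs = resolve_c(0, n_c, pos_b)
--     return resolve_a(0, len(pos_a), [(b + 1, n_c - ic) for b, ic in pairs])
-- ===== Notes on version B (the rewrite author's own statement) =====
-- stated objective: alternative
-- what changed: Replaces the two independent binary searches per middle value with an offline batched search: each array's implicit binary-search tree is walked once, the whole query list being partitioned at every node, and the pos_a walk accumulates the weighted sum directly at the leaves.
import Mathlib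
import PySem

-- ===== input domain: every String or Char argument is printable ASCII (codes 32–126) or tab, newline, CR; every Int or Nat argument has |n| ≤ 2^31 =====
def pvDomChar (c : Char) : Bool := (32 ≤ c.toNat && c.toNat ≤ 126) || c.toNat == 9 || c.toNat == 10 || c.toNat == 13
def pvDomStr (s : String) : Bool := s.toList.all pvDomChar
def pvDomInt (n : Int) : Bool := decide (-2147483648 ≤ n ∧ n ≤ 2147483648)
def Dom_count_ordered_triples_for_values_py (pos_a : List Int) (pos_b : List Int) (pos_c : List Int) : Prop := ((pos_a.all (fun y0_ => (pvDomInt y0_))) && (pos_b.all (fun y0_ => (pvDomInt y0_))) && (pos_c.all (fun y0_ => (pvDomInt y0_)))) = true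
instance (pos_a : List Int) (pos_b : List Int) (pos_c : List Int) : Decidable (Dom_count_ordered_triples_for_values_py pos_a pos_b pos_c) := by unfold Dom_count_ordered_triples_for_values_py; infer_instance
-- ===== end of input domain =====

-- B replaces the per-element binary searches with one batched walk down each array's
-- search tree, partitioning the query list at every node (objective: alternative algorithm).

-- ===== PORT A =====
-- Literal transliteration of A: early return 0 if any list is empty, then for each b in pos_b
-- two bisect_left calls (PySem.List.bisectLeft) and a guarded accumulation.
def count_ordered_triples_for_values_py (pos_a : List Int) (pos_b : List Int) (pos_c : List Int) : Int :=
  if pos_a = [] ∨ pos_b = [] ∨ pos_c = [] then 0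
  else
    pos_b.foldl
      (fun count b =>
        let num_a : Int := (PySem.List.bisectLeft pos_a (b + 1) : Int)
        let idx_c : Nat := PySem.List.bisectLeft pos_c b
        let num_c : Int := (pos_c.length : Int) - (idx_c : Int)
        -- Python truthiness: `if num_a and num_c:`
        if num_a ≠ 0 ∧ num_c ≠ 0 then count + num_a * num_c else count)
      0

-- ===== PORT B =====
-- Source B's resolve_c: batch-resolve the insertion points of all queries in pos_c's segment [lo, hi).
-- (pos_c[mid] is in range on every call B makes — mid < hi ≤ len pos_c — so getD is exact there;
--  the fuel argument only makes the recursion structural: fuel ≥ hi - lo on every call B makes,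
--  so the fuel-0 branch coincides with the lo ≥ hi leaf and is never a cut-off.)
def resolveC (pos_c : List Int) : Nat → Nat → Nat → List Int → List (Int × Nat)
  | 0, lo, _hi, qs => if qs = [] then [] else qs.map (fun b => (b, lo))
  | fuel + 1, lo, hi, qs =>
    if qs = [] then []
    else if lo < hi then
      resolveC pos_c fuel lo ((lo + hi) / 2)
          (qs.filter (fun b => !(decide (pos_c.getD ((lo + hi) / 2) 0 < b)))) ++
        resolveC pos_c fuel ((lo + hi) / 2 + 1) hi
          (qs.filter (fun b => decide (pos_c.getD ((lo + hi) / 2) 0 < b)))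
    else qs.map (fun b => (b, lo))

-- Source B's resolve_a: same batched walk over pos_a, accumulating (insertion point) * weight
-- at the leaves (same fuel guard).
def resolveA (pos_a : List Int) : Nat → Nat → Nat → List (Int × Int) → Int
  | 0, lo, _hi, qs => if qs = [] then 0 else (qs.map (fun q => (lo : Int) * q.2)).sum
  | fuel + 1, lo, hi, qs =>
    if qs = [] then 0
    else if lo < hi then
      resolveA pos_a fuel lo ((lo + hi) / 2)
          (qs.filter (fun q => !(decide (pos_a.getD ((lo + hi) / 2) 0 < q.1)))) +
        resolveA pos_a fuel ((lo + hi) / 2 + 1) hi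
          (qs.filter (fun q => decide (pos_a.getD ((lo + hi) / 2) 0 < q.1)))
    else (qs.map (fun q => (lo : Int) * q.2)).sum

def count_ordered_triples_for_values_py_alt (pos_a : List Int) (pos_b : List Int) (pos_c : List Int) : Int :=
  let n_c := pos_c.length
  let pairs := resolveC pos_c n_c 0 n_c pos_b
  resolveA pos_a pos_a.length 0 pos_a.length (pairs.map (fun p => (p.1 + 1, (n_c : Int) - (p.2 : Int))))

-- ===== PRECONDITION & SPEC =====
-- (no Pre_: A is total, and equality holds on every input)
def Spec_count_ordered_triples_for_values_py (pos_a : List Int) (pos_b : List Int) (pos_c : List Int) (out : Int) : Prop := out = count_ordered_triples_for_values_py_alt pos_a pos_b pos_c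
instance (pos_a : List Int) (pos_b : List Int) (pos_c : List Int) (out : Int) : Decidable (Spec_count_ordered_triples_for_values_py pos_a pos_b pos_c out) := by unfold Spec_count_ordered_triples_for_values_py; infer_instance

-- ===== CLAIM (what is proved, stated in full; the proofs are below) =====
def Claim_equal_count_ordered_triples_for_values_py : Prop := ∀ (pos_a : List Int) (pos_b : List Int) (pos_c : List Int), Dom_count_ordered_triples_for_values_py pos_a pos_b pos_c → Spec_count_ordered_triples_for_values_py pos_a pos_b pos_c (count_ordered_triples_for_values_py pos_a pos_b pos_c)

-- ===== LEMMAS AND PROOFS =====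

-- Functional form of one bisect_left descent restricted to the segment [lo, hi).
def bisectSeg (xs : List Int) (x : Int) (lo hi : Nat) : Nat :=
  if lo < hi then
    if xs.getD ((lo + hi) / 2) 0 < x then bisectSeg xs x ((lo + hi) / 2 + 1) hi
    else bisectSeg xs x lo ((lo + hi) / 2)
  else lo
termination_by hi - lo
decreasing_by all_goals omega

-- PySem's fuelled bisect loop computes bisectSeg once the fuel covers the segment.
lemma bisectLeftLoop_eq_seg (xs : List Int) (x : Int) :
    ∀ (fuel lo hi : Nat), hi ≤ xs.length → hi - lo ≤ fuel →
      PySem.List.bisectLeftLoop xs x fuel lo hi = bisectSeg xs x lo hi := by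
  intro fuel
  induction fuel with
  | zero =>
    intro lo hi hlen hf
    rw [bisectSeg]
    have : ¬ lo < hi := by omega
    simp [PySem.List.bisectLeftLoop, this]
  | succ fuel ih =>
    intro lo hi hlen hf
    rw [bisectSeg]
    by_cases h : lo < hi
    · have hmid : (lo + hi) / 2 < xs.length := by omega
      have hget : xs[(lo + hi) / 2]? = some xs[(lo + hi) / 2] := List.getElem?_eq_getElem hmid
      have hgd : xs.getD ((lo + hi) / 2) 0 = xs[(lo + hi) / 2] := List.getD_eq_getElem xs 0 hmid
      simp only [PySem.List.bisectLeftLoop, if_pos h, hget, hgd]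
      by_cases hc : xs[(lo + hi) / 2] < x
      · simp only [if_pos hc]
        exact ih ((lo + hi) / 2 + 1) hi hlen (by omega)
      · simp only [if_neg hc]
        exact ih lo ((lo + hi) / 2) (by omega) (by omega)
    · simp [PySem.List.bisectLeftLoop, h]

-- bisect_left is the descent over the whole list.
lemma bisectLeft_eq_seg (xs : List Int) (x : Int) :
    PySem.List.bisectLeft xs x = bisectSeg xs x 0 xs.length :=
  bisectLeftLoop_eq_seg xs x xs.length 0 xs.length le_rfl (by omega)

-- Splitting a mapped sum along a Boolean filter.
lemma sum_map_filter_split {α : Type} (p : α → Bool) (f : α → Int) (l : List α) :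
    ((l.filter (fun a => !(p a))).map f).sum + ((l.filter p).map f).sum = (l.map f).sum := by
  induction l with
  | nil => simp
  | cons a l ih =>
    rcases Bool.eq_false_or_eq_true (p a) with h | h <;>
      · simp [h]
        rw [← ih]
        omega

-- The pos_a walk accumulates exactly the per-query products of segment insertion points.
lemma resolveA_eq_sum (la : List Int) :
    ∀ (fuel lo hi : Nat) (qs : List (Int × Int)), hi - lo ≤ fuel →
      resolveA la fuel lo hi qs = (qs.map (fun q => (bisectSeg la q.1 lo hi : Int) * q.2)).sum := by
  intro fuel
  induction fuel with
  | zero =>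
    intro lo hi qs hf
    have h : ¬ lo < hi := by omega
    simp only [resolveA]
    by_cases hq : qs = []
    · simp [hq]
    · rw [if_neg hq]
      apply congrArg
      apply List.map_congr_left
      intro q _
      rw [show bisectSeg la q.1 lo hi = lo by rw [bisectSeg]; simp [h]]
  | succ fuel ih =>
    intro lo hi qs hf
    simp only [resolveA]
    by_cases hq : qs = []
    · simp [hq]
    · rw [if_neg hq]
      by_cases h : lo < hi
      · rw [if_pos h]
        rw [ih lo ((lo + hi) / 2) _ (by omega), ih ((lo + hi) / 2 + 1) hi _ (by omega)]
        have hge : ((qs.filter (fun q => !(decide (la.getD ((lo + hi) / 2) 0 < q.1)))).map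
              (fun q => (bisectSeg la q.1 lo ((lo + hi) / 2) : Int) * q.2))
            = ((qs.filter (fun q => !(decide (la.getD ((lo + hi) / 2) 0 < q.1)))).map
              (fun q => (bisectSeg la q.1 lo hi : Int) * q.2)) := by
          apply List.map_congr_left
          intro q hqm
          have hc : ¬ la.getD ((lo + hi) / 2) 0 < q.1 := by
            have := (List.mem_filter.mp hqm).2; simpa using this
          rw [show bisectSeg la q.1 lo hi = bisectSeg la q.1 lo ((lo + hi) / 2) by
            rw [bisectSeg]; simp only [if_pos h, if_neg hc]]
        have hlt : ((qs.filter (fun q => decide (la.getD ((lo + hi) / 2) 0 < q.1))).map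
              (fun q => (bisectSeg la q.1 ((lo + hi) / 2 + 1) hi : Int) * q.2))
            = ((qs.filter (fun q => decide (la.getD ((lo + hi) / 2) 0 < q.1))).map
              (fun q => (bisectSeg la q.1 lo hi : Int) * q.2)) := by
          apply List.map_congr_left
          intro q hqm
          have hc : la.getD ((lo + hi) / 2) 0 < q.1 := by
            have := (List.mem_filter.mp hqm).2; simpa using this
          rw [show bisectSeg la q.1 lo hi = bisectSeg la q.1 ((lo + hi) / 2 + 1) hi by
            rw [bisectSeg]; simp only [if_pos h, if_pos hc]]
        rw [hge, hlt]
        exact sum_map_filter_split _ _ qs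
      · rw [if_neg h]
        apply congrArg
        apply List.map_congr_left
        intro q _
        rw [show bisectSeg la q.1 lo hi = lo by rw [bisectSeg]; simp [h]]

-- The pos_c walk returns, in some order, every query paired with its segment insertion point.
lemma resolveC_perm (lc : List Int) :
    ∀ (fuel lo hi : Nat) (qs : List Int), hi - lo ≤ fuel →
      (resolveC lc fuel lo hi qs).Perm (qs.map (fun b => (b, bisectSeg lc b lo hi))) := by
  intro fuel
  induction fuel with
  | zero =>
    intro lo hi qs hf
    have h : ¬ lo < hi := by omega
    simp only [resolveC]
    by_cases hq : qs = []
    · simp [hq]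
    · rw [if_neg hq]
      apply List.Perm.of_eq
      apply List.map_congr_left
      intro b _
      rw [show bisectSeg lc b lo hi = lo by rw [bisectSeg]; simp [h]]
  | succ fuel ih =>
    intro lo hi qs hf
    simp only [resolveC]
    by_cases hq : qs = []
    · simp [hq]
    · rw [if_neg hq]
      by_cases h : lo < hi
      · rw [if_pos h]
        have hp1 := ih lo ((lo + hi) / 2)
          (qs.filter (fun b => !(decide (lc.getD ((lo + hi) / 2) 0 < b)))) (by omega)
        have hp2 := ih ((lo + hi) / 2 + 1) hi
          (qs.filter (fun b => decide (lc.getD ((lo + hi) / 2) 0 < b))) (by omega)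
        have hge : ((qs.filter (fun b => !(decide (lc.getD ((lo + hi) / 2) 0 < b)))).map
              (fun b => (b, bisectSeg lc b lo ((lo + hi) / 2))))
            = ((qs.filter (fun b => !(decide (lc.getD ((lo + hi) / 2) 0 < b)))).map
              (fun b => (b, bisectSeg lc b lo hi))) := by
          apply List.map_congr_left
          intro b hbm
          have hc : ¬ lc.getD ((lo + hi) / 2) 0 < b := by
            have := (List.mem_filter.mp hbm).2; simpa using this
          rw [show bisectSeg lc b lo hi = bisectSeg lc b lo ((lo + hi) / 2) by
            rw [bisectSeg]; simp only [if_pos h, if_neg hc]]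
        have hlt : ((qs.filter (fun b => decide (lc.getD ((lo + hi) / 2) 0 < b))).map
              (fun b => (b, bisectSeg lc b ((lo + hi) / 2 + 1) hi)))
            = ((qs.filter (fun b => decide (lc.getD ((lo + hi) / 2) 0 < b))).map
              (fun b => (b, bisectSeg lc b lo hi))) := by
          apply List.map_congr_left
          intro b hbm
          have hc : lc.getD ((lo + hi) / 2) 0 < b := by
            have := (List.mem_filter.mp hbm).2; simpa using this
          rw [show bisectSeg lc b lo hi = bisectSeg lc b ((lo + hi) / 2 + 1) hi by
            rw [bisectSeg]; simp only [if_pos h, if_pos hc]]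
        rw [hge] at hp1
        rw [hlt] at hp2
        refine (hp1.append hp2).trans ?_
        rw [← List.map_append]
        exact ((List.perm_append_comm.trans
          (List.filter_append_perm (fun b => decide (lc.getD ((lo + hi) / 2) 0 < b)) qs)).map _)
      · rw [if_neg h]
        apply List.Perm.of_eq
        apply List.map_congr_left
        intro b _
        rw [show bisectSeg lc b lo hi = lo by rw [bisectSeg]; simp [h]]

-- The per-value contribution both programs count.
def segContrib (la lc : List Int) (b : Int) : Int :=
  (bisectSeg la (b + 1) 0 la.length : Int) *
    ((lc.length : Int) - (bisectSeg lc b 0 lc.length : Int))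

-- B computes the plain per-element sum of contributions, on every input.
lemma alt_eq_sum (pos_a pos_b pos_c : List Int) :
    count_ordered_triples_for_values_py_alt pos_a pos_b pos_c
      = (pos_b.map (segContrib pos_a pos_c)).sum := by
  unfold count_ordered_triples_for_values_py_alt
  rw [resolveA_eq_sum pos_a pos_a.length 0 pos_a.length _ (by omega), List.map_map]
  have hperm := (resolveC_perm pos_c pos_c.length 0 pos_c.length pos_b (by omega)).map
    ((fun q : Int × Int => (bisectSeg pos_a q.1 0 pos_a.length : Int) * q.2) ∘
      (fun p : Int × Nat => (p.1 + 1, (pos_c.length : Int) - (p.2 : Int))))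
  rw [List.Perm.sum_eq hperm, List.map_map]
  apply congrArg
  apply List.map_congr_left
  intro b _
  simp [segContrib, Function.comp]

-- A's guarded step adds exactly its bisect contribution (the guard only skips zero products).
lemma stepA_eq (pos_a pos_c : List Int) (count b : Int) :
    (let num_a : Int := (PySem.List.bisectLeft pos_a (b + 1) : Int)
     let idx_c : Nat := PySem.List.bisectLeft pos_c b
     let num_c : Int := (pos_c.length : Int) - (idx_c : Int)
     if num_a ≠ 0 ∧ num_c ≠ 0 then count + num_a * num_c else count)
    = count + segContrib pos_a pos_c b := by
  simp only [bisectLeft_eq_seg, segContrib]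
  split
  · rfl
  · rename_i hg
    by_cases h0 : ((bisectSeg pos_a (b + 1) 0 pos_a.length : Nat) : Int) = 0
    · simp [h0]
    · have h1 : (pos_c.length : Int) - (bisectSeg pos_c b 0 pos_c.length : Int) = 0 := by
        by_contra hcc
        exact hg ⟨h0, hcc⟩
      simp [h1]

-- ===== VERDICT (by name: the statement is the Claim_ definition above) =====
theorem count_ordered_triples_for_values_py_spec : Claim_equal_count_ordered_triples_for_values_py := by
  intro pos_a pos_b pos_c _
  unfold Spec_count_ordered_triples_for_values_py
  rw [alt_eq_sum]
  unfold count_ordered_triples_for_values_py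
  have hfold : pos_b.foldl
      (fun count b =>
        let num_a : Int := (PySem.List.bisectLeft pos_a (b + 1) : Int)
        let idx_c : Nat := PySem.List.bisectLeft pos_c b
        let num_c : Int := (pos_c.length : Int) - (idx_c : Int)
        if num_a ≠ 0 ∧ num_c ≠ 0 then count + num_a * num_c else count) 0
      = (pos_b.map (segContrib pos_a pos_c)).sum := by
    rw [PySem.List.foldl_congr_mem _ _
      (fun count b => count + segContrib pos_a pos_c b) 0
      (fun count b _ => stepA_eq pos_a pos_c count b)]
    rw [PySem.List.foldl_add]
    simp
  split
  · rename_i hemp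
    have hz : ∀ b ∈ pos_b, segContrib pos_a pos_c b = 0 := by
      intro b _
      rcases hemp with h | h | h
      · simp [segContrib, h, show bisectSeg [] (b + 1) 0 0 = 0 by rw [bisectSeg]; simp]
      · simp [h] at *
      · simp [segContrib, h, show bisectSeg [] b 0 0 = 0 by rw [bisectSeg]; simp]
    have : pos_b.map (segContrib pos_a pos_c) = pos_b.map (fun _ => (0 : Int)) :=
      List.map_congr_left hz
    simp [this]
  · exact hfold
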